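-- pv_equiv track=rewrite | github.com/nataliiaborovyk/ITS_Python | Lezione_07/comp_01.py | inverti_mappa
-- ===== SOURCE A (Python) =====
-- def inverti_mappa(dizionario: dict[str:int]) -> dict[int:str]:
--     dizionario_invertito:dict[int:str] = {}
--     for k, v in dizionario.items():
--         if v in dizionario_invertito:
--             continue
--         else:
--             dizionario_invertito[v] = k
--     return dizionario_invertito
-- ===== SOURCE B (Python) =====
-- def inverti_mappa(dizionario: dict[str:int]) -> dict[int:str]:
--     # Recursive decomposition: take the head pair, drop every later pair with the
--     # same value, recurse on the rest; no membership test against the output.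
--     def go(pairs):
--         if not pairs:
--             return []
--         (k, v) = pairs[0]
--         return [(v, k)] + go([(k2, v2) for (k2, v2) in pairs[1:] if v2 != v])
--     return dict(go(list(dizionario.items())))
-- ===== Notes on version B (the rewrite author's own statement) =====
-- stated objective: alternative
-- what changed: Replaces the dict-membership accumulator loop with a recursive head-and-filter decomposition: keep the head pair inverted, filter all later pairs with the same value out of the tail, recurse; no membership test or accumulator.
import Mathlib
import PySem

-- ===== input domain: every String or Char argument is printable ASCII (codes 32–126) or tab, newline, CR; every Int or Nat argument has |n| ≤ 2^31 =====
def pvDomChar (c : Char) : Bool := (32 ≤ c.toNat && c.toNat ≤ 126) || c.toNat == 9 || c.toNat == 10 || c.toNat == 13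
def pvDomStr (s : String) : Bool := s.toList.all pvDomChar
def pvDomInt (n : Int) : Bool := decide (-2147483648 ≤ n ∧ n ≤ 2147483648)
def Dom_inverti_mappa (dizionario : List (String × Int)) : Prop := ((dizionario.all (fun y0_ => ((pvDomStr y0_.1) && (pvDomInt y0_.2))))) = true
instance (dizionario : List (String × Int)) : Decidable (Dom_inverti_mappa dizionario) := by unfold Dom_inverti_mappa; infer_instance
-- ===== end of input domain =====

-- B replaces A's membership-tested accumulator loop by a recursive head-and-filter
-- decomposition (same result, no speed claim).

-- ===== PORT A =====
def inverti_mappa (dizionario : List (String × Int)) : List (Int × String) :=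
  (dizionario.foldl
    (fun (acc : PySem.Dict Int String) kv =>
      if acc.contains kv.2 then acc else acc.insert kv.2 kv.1)
    PySem.Dict.empty).items

-- ===== PORT B =====
-- go: keep the head pair inverted, recurse on the tail with the head's value filtered out
def invGo : List (String × Int) → List (Int × String)
  | [] => []
  | (k, v) :: rest => (v, k) :: invGo (rest.filter (fun p => p.2 ≠ v))
termination_by l => l.length
decreasing_by
  simpa using Nat.lt_succ_of_le (le_trans (List.length_filter_le _ rest.attach) (by simp))

def inverti_mappa_alt (dizionario : List (String × Int)) : List (Int × String) :=
  (PySem.Dict.ofList (invGo dizionario)).items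

-- ===== PRECONDITION & SPEC =====
def Spec_inverti_mappa (dizionario : List (String × Int)) (out : List (Int × String)) : Prop := out = inverti_mappa_alt dizionario
instance (dizionario : List (String × Int)) (out : List (Int × String)) : Decidable (Spec_inverti_mappa dizionario out) := by unfold Spec_inverti_mappa; infer_instance

-- ===== CLAIM (what is proved, stated in full; the proofs are below) =====
def Claim_equal_inverti_mappa : Prop := ∀ (dizionario : List (String × Int)), Dom_inverti_mappa dizionario → Spec_inverti_mappa dizionario (inverti_mappa dizionario)

-- ===== LEMMAS AND PROOFS =====

theorem invGo_nil : invGo [] = [] := by rw [invGo]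

theorem invGo_cons (k : String) (v : Int) (rest : List (String × Int)) :
    invGo ((k, v) :: rest) = (v, k) :: invGo (rest.filter (fun p => p.2 ≠ v)) := by
  rw [invGo]

-- first components of invGo's output come from second components of its input
theorem mem_fst_invGo_bounded (n : Nat) :
    ∀ (l : List (String × Int)), l.length ≤ n → ∀ (a : Int),
      a ∈ (invGo l).map Prod.fst → ∃ p ∈ l, p.2 = a := by
  induction n with
  | zero =>
    intro l hl a h
    rw [List.length_eq_zero_iff.mp (Nat.le_zero.mp hl)] at h ⊢
    simp [invGo_nil] at h
  | succ n ih =>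
    intro l hl a h
    match l with
    | [] => simp [invGo_nil] at h
    | (k, v) :: rest =>
      rw [invGo_cons] at h
      simp only [List.map_cons, List.mem_cons] at h
      rcases h with h | h
      · exact ⟨(k, v), List.mem_cons_self, h.symm⟩
      · have hlen : (rest.filter (fun p => p.2 ≠ v)).length ≤ n :=
          le_trans (List.length_filter_le _ rest) (Nat.le_of_succ_le_succ hl)
        rcases ih _ hlen a h with ⟨p, hp, hpa⟩
        exact ⟨p, List.mem_cons_of_mem _ (List.mem_filter.mp hp).1, hpa⟩

theorem mem_fst_invGo (l : List (String × Int)) (a : Int)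
    (h : a ∈ (invGo l).map Prod.fst) : ∃ p ∈ l, p.2 = a :=
  mem_fst_invGo_bounded l.length l le_rfl a h

theorem nodup_fst_invGo_bounded (n : Nat) :
    ∀ (l : List (String × Int)), l.length ≤ n → ((invGo l).map Prod.fst).Nodup := by
  induction n with
  | zero =>
    intro l hl
    rw [List.length_eq_zero_iff.mp (Nat.le_zero.mp hl)]
    simp [invGo_nil]
  | succ n ih =>
    intro l hl
    match l with
    | [] => simp [invGo_nil]
    | (k, v) :: rest =>
      rw [invGo_cons, List.map_cons]
      refine List.nodup_cons.mpr ⟨fun hmem => ?_, ?_⟩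
      · rcases mem_fst_invGo _ _ hmem with ⟨p, hp, hpv⟩
        have := List.mem_filter.mp hp
        simp [hpv] at this
      · exact ih _ (le_trans (List.length_filter_le _ rest) (Nat.le_of_succ_le_succ hl))

theorem nodup_fst_invGo (l : List (String × Int)) : ((invGo l).map Prod.fst).Nodup :=
  nodup_fst_invGo_bounded l.length l le_rfl

-- loop invariant for A's fold
theorem foldA_items (l : List (String × Int)) (d : PySem.Dict Int String) :
    (l.foldl
      (fun (acc : PySem.Dict Int String) kv =>
        if acc.contains kv.2 then acc else acc.insert kv.2 kv.1) d).items
    = d.items ++ invGo (l.filter (fun p => !(d.contains p.2))) := by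
  induction l generalizing d with
  | nil => simp [invGo_nil]
  | cons hd tl ih =>
    obtain ⟨k, v⟩ := hd
    by_cases hc : d.contains v = true
    · simp only [List.foldl_cons, List.filter_cons, hc]
      simpa using ih d
    · have hc' : d.contains v = false := by simpa using hc
      simp only [List.foldl_cons, List.filter_cons, hc']
      rw [ih]
      simp only [Bool.false_eq_true, Bool.not_false, if_false, if_true]
      rw [PySem.Dict.items_insert_of_not_contains _ _ hc']
      have hfilter : tl.filter (fun p => !((d.insert v k).contains p.2))
          = (tl.filter (fun p => !(d.contains p.2))).filter (fun p => p.2 ≠ v) := by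
        rw [List.filter_filter]
        apply List.filter_congr
        intro p _
        simp [PySem.Dict.contains_insert, Bool.beq_eq_decide_eq, eq_comm]
      rw [hfilter]
      simp [invGo_cons]

-- ofList over a list with distinct keys returns exactly that list of items
theorem items_ofList_nodup (l : List (Int × String)) (h : (l.map Prod.fst).Nodup) :
    (PySem.Dict.ofList l).items = l := by
  have hofl : PySem.Dict.ofList l
      = l.foldl (fun (d : PySem.Dict Int String) p => d.insert p.1 p.2) PySem.Dict.empty := rfl
  rw [hofl]
  have := PySem.Dict.items_foldl_insert_fresh (l := l) (k := Prod.fst) (v := Prod.snd)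
    (d := PySem.Dict.empty) (by simp) h
  simpa using this

-- ===== VERDICT (by name: the statement is the Claim_ definition above) =====
theorem inverti_mappa_spec : Claim_equal_inverti_mappa := by
  intro dizionario _
  unfold Spec_inverti_mappa inverti_mappa inverti_mappa_alt
  rw [foldA_items, items_ofList_nodup _ (nodup_fst_invGo _)]
  simp [show (PySem.Dict.empty : PySem.Dict Int String).items = [] from rfl]
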